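-- pv_equiv track=rewrite | github.com/yuchuehw/LeetCodeMarathon | 1252.py | oddCells2
-- ===== SOURCE A (Python) =====
-- from typing import List
--
-- def oddCells2(m: int, n: int, indices: List[List[int]]) -> int:
--   lm = [0]*m
--   ln = [0]*n
--   for i,j in indices:
--     lm[i] ^= 1
--     ln[j] ^= 1
--   om = lm.count(1)
--   on = ln.count(1)
--   return (n-on) * om + (m-om) * on
-- ===== SOURCE B (Python) =====
-- from typing import List
--
-- def oddCells2(m: int, n: int, indices: List[List[int]]) -> int:
--     # direct simulation: build the m x n grid, apply every increment, count odd cells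
--     grid = [[0] * n for _ in range(m)]
--     for r, c in indices:
--         row = grid[r]
--         for j in range(n):
--             row[j] += 1
--         for i in range(m):
--             grid[i][c] += 1
--     return sum(v % 2 for row in grid for v in row)
-- ===== Notes on version B (the rewrite author's own statement) =====
-- stated objective: alternative
-- what changed: B simulates the process directly: it builds the m x n grid, performs every row and column increment cell by cell, and counts odd entries, instead of A's parity arrays plus the closed counting formula (n-on)*om+(m-om)*on.
import Mathlib
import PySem

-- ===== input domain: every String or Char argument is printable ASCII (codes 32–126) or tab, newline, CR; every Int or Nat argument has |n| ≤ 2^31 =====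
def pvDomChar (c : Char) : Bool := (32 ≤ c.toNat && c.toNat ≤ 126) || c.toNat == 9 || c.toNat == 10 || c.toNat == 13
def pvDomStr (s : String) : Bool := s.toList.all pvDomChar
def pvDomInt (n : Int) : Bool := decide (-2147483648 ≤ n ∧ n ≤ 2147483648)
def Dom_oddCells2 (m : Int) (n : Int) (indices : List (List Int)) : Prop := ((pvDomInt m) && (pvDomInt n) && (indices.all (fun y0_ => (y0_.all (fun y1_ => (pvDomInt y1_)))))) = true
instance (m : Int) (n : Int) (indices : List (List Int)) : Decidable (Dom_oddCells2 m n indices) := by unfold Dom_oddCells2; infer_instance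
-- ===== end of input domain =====

-- B replaces A's parity arrays + counting formula by a direct simulation (build the grid,
-- apply every increment, count odd cells); equivalence of the return values is proved below.

-- ===== PORT A =====
-- for i,j in indices: lm[i] ^= 1; ln[j] ^= 1   (unpacking raises unless the row is a pair)
def oddStepA (st : Option (List Int × List Int)) (p : List Int) : Option (List Int × List Int) :=
  match st, p with
  | some (lm, ln), [i, j] => do
      let vi ← PySem.List.pyGet? lm i
      let lm ← PySem.List.pySet? lm i (PySem.Int.bxor vi 1)
      let vj ← PySem.List.pyGet? ln j
      let ln ← PySem.List.pySet? ln j (PySem.Int.bxor vj 1)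
      pure (lm, ln)
  | _, _ => none

def oddCells2 (m : Int) (n : Int) (indices : List (List Int)) : Int :=
  match indices.foldl oddStepA (some (List.replicate m.toNat 0, List.replicate n.toNat 0)) with
  | none => 0
  | some (lm, ln) =>
      let om : Int := lm.count 1
      let on : Int := ln.count 1
      (n - on) * om + (m - om) * on

-- ===== PORT B =====
-- for j in range(n): row[j] += 1
def oddRowIncr (st : Option (List Int)) (j : Int) : Option (List Int) := do
  let ro ← st
  let v ← PySem.List.pyGet? ro j
  PySem.List.pySet? ro j (v + 1)

-- for i in range(m): grid[i][c] += 1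
def oddColIncr (c : Int) (st : Option (List (List Int))) (i : Int) : Option (List (List Int)) := do
  let g ← st
  let rw ← PySem.List.pyGet? g i
  let v ← PySem.List.pyGet? rw c
  let rw' ← PySem.List.pySet? rw c (v + 1)
  PySem.List.pySet? g i rw'

def oddStepB (m : Int) (n : Int) (st : Option (List (List Int))) (p : List Int) : Option (List (List Int)) :=
  match st, p with
  | some grid, [r, c] => do
      let row ← PySem.List.pyGet? grid r
      let row ← (PySem.List.pyRange 0 n 1).foldl oddRowIncr (some row)
      let grid ← PySem.List.pySet? grid r row
      (PySem.List.pyRange 0 m 1).foldl (oddColIncr c) (some grid)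
  | _, _ => none

def oddCells2_alt (m : Int) (n : Int) (indices : List (List Int)) : Int :=
  match indices.foldl (oddStepB m n) (some (List.replicate m.toNat (List.replicate n.toNat 0))) with
  | none => 0
  | some grid => (grid.flatMap (fun row => row.map (fun v => PySem.Int.mod v 2))).sum

-- ===== PRECONDITION & SPEC =====
def pvPairOK (m : Int) (n : Int) (p : List Int) : Bool :=
  match p with
  | [i, j] => decide (-m ≤ i ∧ i < m ∧ -n ≤ j ∧ j < n)
  | _ => false

-- Pre_ excludes exactly the inputs on which A raises: a row of indices that is not a pair
-- (ValueError on unpacking) or whose entries are out of range for the lists (IndexError).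
def Pre_oddCells2 (m : Int) (n : Int) (indices : List (List Int)) : Prop :=
  ∀ p ∈ indices, pvPairOK m n p = true
instance (m : Int) (n : Int) (indices : List (List Int)) : Decidable (Pre_oddCells2 m n indices) := by
  unfold Pre_oddCells2; infer_instance

def pvWitness_oddCells2 : Int × Int × List (List Int) := (2, 3, [[0, 1], [1, 2], [-1, 0]])

def Spec_oddCells2 (m : Int) (n : Int) (indices : List (List Int)) (out : Int) : Prop := out = oddCells2_alt m n indices
instance (m : Int) (n : Int) (indices : List (List Int)) (out : Int) : Decidable (Spec_oddCells2 m n indices out) := by unfold Spec_oddCells2; infer_instance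

-- ===== CLAIM (what is proved, stated in full; the proofs are below) =====
def Claim_equal_oddCells2 : Prop := ∀ (m : Int) (n : Int) (indices : List (List Int)), Dom_oddCells2 m n indices → Pre_oddCells2 m n indices → Spec_oddCells2 m n indices (oddCells2 m n indices)

-- ===== LEMMAS AND PROOFS =====

-- normalized (Python, possibly negative) index
def pvKey (len : Nat) (i : Int) : Nat := if 0 ≤ i then i.toNat else len - (-i).toNat

theorem pvKey_lt {len : Nat} {i : Int} (h1 : -(len:Int) ≤ i) (h2 : i < len) (h3 : 0 < len) :
    pvKey len i < len := by unfold pvKey; split_ifs <;> omega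

theorem pyIdx_eq {len : Nat} {i : Int} (h1 : -(len:Int) ≤ i) (h2 : i < len) :
    PySem.List.pyIdx? len i = some (pvKey len i) := by
  unfold PySem.List.pyIdx? pvKey; split_ifs <;> first | rfl | omega

theorem pyGet_eq {α : Type} (xs : List α) (i : Int) (d : α)
    (h1 : -(xs.length:Int) ≤ i) (h2 : i < xs.length) :
    PySem.List.pyGet? xs i = some (xs.getD (pvKey xs.length i) d) := by
  have h3 : 0 < xs.length := by omega
  have hk := pvKey_lt h1 h2 h3
  simp [PySem.List.pyGet?, pyIdx_eq h1 h2, List.getElem?_eq_getElem hk]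

theorem pySet_eq {α : Type} (xs : List α) (i : Int) (v : α)
    (h1 : -(xs.length:Int) ≤ i) (h2 : i < xs.length) :
    PySem.List.pySet? xs i v = some (xs.set (pvKey xs.length i) v) := by
  simp [PySem.List.pySet?, pyIdx_eq h1 h2]

theorem getD_map_lt {α β : Type} (l : List α) (f : α → β) (x : Nat) (d : α) (d' : β)
    (hx : x < l.length) : (l.map f).getD x d' = f (l.getD x d) := by
  rw [List.getD_eq_getElem _ _ (by simpa using hx), List.getD_eq_getElem _ _ hx]
  simp

theorem getD_set_lt {α : Type} (l : List α) (k : Nat) (v : α) (x : Nat) (d : α)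
    (hk : k < l.length) :
    (l.set k v).getD x d = if x = k then v else l.getD x d := by
  by_cases hx : x < l.length
  · rw [List.getD_eq_getElem _ _ (by simpa using hx)]
    rw [List.getElem_set]
    split_ifs with h1 h2 h3 <;> first
      | omega
      | rfl
      | (rw [List.getD_eq_getElem _ _ hx])
  · have h1 : ¬ x < (l.set k v).length := by simpa using hx
    rw [List.getD_eq_default _ _ (by omega), List.getD_eq_default _ _ (by simpa using h1)]
    split_ifs with h
    · omega
    · rfl

theorem take_succ_set {α : Type} (l : List α) (k : Nat) (w : α) (h : k < l.length) :
    (l.set k w).take (k+1) = l.take k ++ [w] := by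
  rw [List.take_add_one, List.getElem?_set_self (by simpa using h), List.take_set]
  rw [List.set_eq_of_length_le (by simp)]
  simp

theorem drop_succ_set {α : Type} (l : List α) (k : Nat) (w : α) :
    (l.set k w).drop (k+1) = l.drop (k+1) := by
  rw [List.drop_set]; simp

theorem rowloop (n : Int) (a : Int) (ha : 0 ≤ a) (l : List Int) (hl : l.length = n.toNat) :
    (PySem.List.pyRange a n 1).foldl oddRowIncr (some l)
      = some (l.take a.toNat ++ (l.drop a.toNat).map (· + 1)) := by
  by_cases hk : (n - a).toNat = 0
  case pos =>
    rw [PySem.List.pyRange_one_eq_nil (by omega), List.foldl_nil]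
    have hle : l.length ≤ a.toNat := by omega
    rw [List.take_of_length_le hle, List.drop_of_length_le hle]
    simp
  case neg =>
    have hlt : a < n := by omega
    rw [PySem.List.pyRange_one_cons hlt, List.foldl_cons]
    have hget := pyGet_eq l a 0 (by omega) (by omega)
    have hkey : pvKey l.length a = a.toNat := by unfold pvKey; split_ifs <;> omega
    have hset := pySet_eq l a ((l.getD a.toNat 0) + 1) (by omega) (by omega)
    rw [hkey] at hget hset
    have hstep : oddRowIncr (some l) a = some (l.set a.toNat (l.getD a.toNat 0 + 1)) := by
      simp only [oddRowIncr, Option.bind_eq_bind, Option.bind_some, hget, hset]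
    rw [hstep]
    rw [rowloop n (a + 1) (by omega) _ (by simpa using hl)]
    congr 1
    have hlt2 : a.toNat < l.length := by omega
    have hts : (a + 1).toNat = a.toNat + 1 := by omega
    rw [hts, take_succ_set _ _ _ hlt2, drop_succ_set,
      List.drop_eq_getElem_cons hlt2, List.getD_eq_getElem _ _ hlt2]
    simp
    rw [List.drop_eq_getElem_cons (show a.toNat < (l.map (· + 1)).length by simpa using hlt2)]
    simp
termination_by (n - a).toNat
decreasing_by omega

-- the per-row effect of one pass of the column loop
def rowfn (kc : Nat) (rw : List Int) : List Int := rw.set kc (rw.getD kc 0 + 1)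

theorem colloop (m n c a : Int) (ha : 0 ≤ a) (hc1 : -n ≤ c) (hc2 : c < n)
    (grid : List (List Int)) (hg : grid.length = m.toNat)
    (hrows : ∀ row ∈ grid, row.length = n.toNat) :
    (PySem.List.pyRange a m 1).foldl (oddColIncr c) (some grid)
      = some (grid.take a.toNat ++ (grid.drop a.toNat).map (rowfn (pvKey n.toNat c))) := by
  by_cases hk : (m - a).toNat = 0
  case pos =>
    rw [PySem.List.pyRange_one_eq_nil (by omega), List.foldl_nil]
    have hle : grid.length ≤ a.toNat := by omega
    rw [List.take_of_length_le hle, List.drop_of_length_le hle]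
    simp
  case neg =>
    have hn0 : 0 < n := by omega
    have hlt : a < m := by omega
    have hlt2 : a.toNat < grid.length := by omega
    have hget := pyGet_eq grid a [] (by omega) (by omega)
    have hkey : pvKey grid.length a = a.toNat := by unfold pvKey; split_ifs <;> omega
    rw [hkey] at hget
    set rw0 : List Int := grid.getD a.toNat [] with hrw0
    have hrwmem : rw0 ∈ grid := by
      rw [hrw0, List.getD_eq_getElem _ _ hlt2]; exact List.getElem_mem hlt2
    have hrwlen : rw0.length = n.toNat := hrows rw0 hrwmem
    have hgc := pyGet_eq rw0 c 0 (by omega) (by omega)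
    have hsc := pySet_eq rw0 c ((rw0.getD (pvKey rw0.length c) 0) + 1) (by omega) (by omega)
    have hkc : pvKey rw0.length c = pvKey n.toNat c := by rw [hrwlen]
    rw [hkc] at hgc hsc
    have hsg := pySet_eq grid a (rowfn (pvKey n.toNat c) rw0) (by omega) (by omega)
    rw [hkey] at hsg
    have hstep : oddColIncr c (some grid) a = some (grid.set a.toNat (rowfn (pvKey n.toNat c) rw0)) := by
      simp only [oddColIncr, Option.bind_eq_bind, Option.bind_some, hget, hgc, hsc]
      rw [show rw0.set (pvKey n.toNat c) (rw0.getD (pvKey n.toNat c) 0 + 1) = rowfn (pvKey n.toNat c) rw0 from rfl]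
      exact hsg
    rw [PySem.List.pyRange_one_cons hlt, List.foldl_cons, hstep]
    rw [colloop m n c (a + 1) (by omega) hc1 hc2 _ (by simpa using hg)
        (by intro row hrow
            rcases List.mem_or_eq_of_mem_set hrow with h | h
            · exact hrows _ h
            · rw [h, rowfn, List.length_set]; exact hrwlen)]
    congr 1
    have hts : (a + 1).toNat = a.toNat + 1 := by omega
    rw [hts, take_succ_set _ _ _ hlt2, drop_succ_set,
      List.drop_eq_getElem_cons hlt2]
    simp
    rw [List.drop_eq_getElem_cons (show a.toNat < (grid.map (rowfn (pvKey n.toNat c))).length by simpa using hlt2)]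
    simp
    rw [hrw0, List.getD_eq_getElem _ _ hlt2]
termination_by (m - a).toNat
decreasing_by omega

theorem innerSum (a : Int) (ha : a = 0 ∨ a = 1) (ln : List Int)
    (hbn : ∀ v ∈ ln, v = 0 ∨ v = 1) :
    ((ln.map (fun b => (a + b) % 2)).sum : Int)
      = if a = 1 then (ln.length : Int) - ln.count 1 else ln.count 1 := by
  induction ln with
  | nil => rcases ha with h | h <;> simp [h]
  | cons b tl ih =>
    have hb := hbn b (by simp)
    have ih2 := ih (fun v hv => hbn v (by simp [hv]))
    rw [List.map_cons, List.sum_cons, ih2, List.count_cons]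
    rcases ha with h | h <;> rcases hb with h2 | h2 <;> subst h <;> subst h2 <;>
      norm_num <;> push_cast <;> omega

theorem countSum (lm ln : List Int) (hbm : ∀ v ∈ lm, v = 0 ∨ v = 1)
    (hbn : ∀ v ∈ ln, v = 0 ∨ v = 1) :
    ((lm.map (fun a => ((ln.map (fun b => (a + b) % 2)).sum))).sum : Int)
      = ((ln.length : Int) - ln.count 1) * lm.count 1
        + ((lm.length : Int) - lm.count 1) * ln.count 1 := by
  induction lm with
  | nil => simp
  | cons a tl ih =>
    have ha := hbm a (by simp)
    have ih2 := ih (fun v hv => hbm v (by simp [hv]))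
    rw [List.map_cons, List.sum_cons, ih2, List.count_cons,
      innerSum a (by tauto) ln hbn]
    rcases ha with h | h <;> subst h <;> norm_num <;> push_cast <;> ring

theorem gridSum (grid : List (List Int)) (lm ln : List Int)
    (hg : grid.length = lm.length) (hrows : ∀ row ∈ grid, row.length = ln.length)
    (hpar : ∀ x, x < lm.length → ∀ y, y < ln.length →
      ((grid.getD x []).getD y 0) % 2 = (lm.getD x 0 + ln.getD y 0) % 2) :
    (grid.flatMap (fun row => row.map (fun v => PySem.Int.mod v 2))).sum
      = (lm.map (fun a => ((ln.map (fun b => (a + b) % 2)).sum))).sum := by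
  have hmod : ∀ v : Int, PySem.Int.mod v 2 = v % 2 :=
    fun v => PySem.Int.mod_eq_emod_of_pos (by norm_num)
  have heq : grid.map (fun row => row.map (fun v => v % 2))
      = lm.map (fun a => ln.map (fun b => (a + b) % 2)) := by
    apply List.ext_getElem (by simp [hg])
    intro x h1 h2
    simp only [List.getElem_map]
    have hxg : x < grid.length := by simpa using h1
    have hxl : x < lm.length := by simpa [hg] using hxg
    apply List.ext_getElem (by simp [hrows _ (List.getElem_mem hxg)])
    intro y k1 k2
    simp only [List.getElem_map]
    have hyr : y < (grid[x]).length := by simpa using k1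
    have hyl : y < ln.length := by
      have := hrows _ (List.getElem_mem hxg); omega
    have hp := hpar x hxl y hyl
    rw [List.getD_eq_getElem _ _ hxg, List.getD_eq_getElem _ _ hyr,
      List.getD_eq_getElem _ _ hxl, List.getD_eq_getElem _ _ hyl] at hp
    exact hp
  simp only [hmod]
  rw [List.flatMap_def, heq, List.sum_flatten, List.map_map]
  rfl

theorem mainLoop (m n : Int) (hm : 0 < m) (hn : 0 < n) (indices : List (List Int))
    (hpre : ∀ p ∈ indices, pvPairOK m n p = true)
    (lm ln : List Int) (grid : List (List Int))
    (hlm : lm.length = m.toNat) (hln : ln.length = n.toNat)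
    (hg : grid.length = m.toNat) (hrows : ∀ row ∈ grid, row.length = n.toNat)
    (hbm : ∀ v ∈ lm, v = 0 ∨ v = 1) (hbn : ∀ v ∈ ln, v = 0 ∨ v = 1)
    (hpar : ∀ x, x < m.toNat → ∀ y, y < n.toNat →
      ((grid.getD x []).getD y 0) % 2 = (lm.getD x 0 + ln.getD y 0) % 2) :
    (match indices.foldl oddStepA (some (lm, ln)) with
     | none => (0:Int)
     | some (lm2, ln2) =>
        (n - (ln2.count 1 : Int)) * (lm2.count 1 : Int)
          + (m - (lm2.count 1 : Int)) * (ln2.count 1 : Int))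
    = (match indices.foldl (oddStepB m n) (some grid) with
       | none => (0:Int)
       | some grid2 => (grid2.flatMap (fun row => row.map (fun v => PySem.Int.mod v 2))).sum) := by
  induction indices generalizing lm ln grid with
  | nil =>
    simp only [List.foldl_nil]
    rw [gridSum grid lm ln (by omega) (by intro r hr; rw [hrows r hr, hln]) (by
      intro x hx y hy; exact hpar x (by omega) y (by omega)),
      countSum lm ln hbm hbn, hlm, hln]
    have h1 : ((m.toNat : Int)) = m := by omega
    have h2 : ((n.toNat : Int)) = n := by omega
    rw [h1, h2]
  | cons p tl ih =>
    have hp := hpre p (by simp)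
    match p with
    | [] => simp [pvPairOK] at hp
    | [_] => simp [pvPairOK] at hp
    | (_ :: _ :: _ :: _) => simp [pvPairOK] at hp
    | [i, j] =>
      simp only [pvPairOK, decide_eq_true_eq] at hp
      obtain ⟨hi1, hi2, hj1, hj2⟩ := hp
      have hmlen : (lm.length : Int) = m := by rw [hlm]; omega
      have hnlen : (ln.length : Int) = n := by rw [hln]; omega
      have hglen : (grid.length : Int) = m := by rw [hg]; omega
      set ki := pvKey m.toNat i with hki
      set kj := pvKey n.toNat j with hkj
      have hkim : ki < m.toNat := by rw [hki]; exact pvKey_lt (by omega) (by omega) (by omega)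
      have hkjn : kj < n.toNat := by rw [hkj]; exact pvKey_lt (by omega) (by omega) (by omega)
      have hkeym : pvKey lm.length i = ki := by rw [hlm]
      have hkeyg : pvKey grid.length i = ki := by rw [hg]
      have hkeyn : pvKey ln.length j = kj := by rw [hln]
      -- A's step
      have hgetm := pyGet_eq lm i 0 (by omega) (by omega)
      have hsetm := pySet_eq lm i (PySem.Int.bxor (lm.getD ki 0) 1) (by omega) (by omega)
      have hgetn := pyGet_eq ln j 0 (by omega) (by omega)
      have hsetn := pySet_eq ln j (PySem.Int.bxor (ln.getD kj 0) 1) (by omega) (by omega)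
      rw [hkeym] at hgetm hsetm
      rw [hkeyn] at hgetn hsetn
      have hstepA : oddStepA (some (lm, ln)) [i, j]
          = some (lm.set ki (PySem.Int.bxor (lm.getD ki 0) 1),
                  ln.set kj (PySem.Int.bxor (ln.getD kj 0) 1)) := by
        simp only [oddStepA, Option.bind_eq_bind, Option.bind_some, hgetm, hsetm, hgetn, hsetn]
        rfl
      -- B's step
      have hgmem : grid.getD ki [] ∈ grid := by
        rw [List.getD_eq_getElem _ _ (by omega)]; exact List.getElem_mem (by omega)
      have hrlen : (grid.getD ki []).length = n.toNat := hrows _ hgmem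
      have hgetg := pyGet_eq grid i [] (by omega) (by omega)
      rw [hkeyg] at hgetg
      have hrow0 := rowloop n 0 (by omega) (grid.getD ki []) hrlen
      have hrow : (PySem.List.pyRange 0 n 1).foldl oddRowIncr (some (grid.getD ki []))
          = some ((grid.getD ki []).map (· + 1)) := by
        rw [hrow0]; norm_num
      have hsetg := pySet_eq grid i ((grid.getD ki []).map (· + 1)) (by omega) (by omega)
      rw [hkeyg] at hsetg
      set grid1 := grid.set ki ((grid.getD ki []).map (· + 1)) with hgrid1
      have hg1len : grid1.length = m.toNat := by rw [hgrid1, List.length_set]; exact hg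
      have hg1rows : ∀ row ∈ grid1, row.length = n.toNat := by
        intro row hrowm
        rcases List.mem_or_eq_of_mem_set hrowm with h | h
        · exact hrows _ h
        · rw [h, List.length_map]; exact hrlen
      have hcol0 := colloop m n j 0 (by omega) (by omega) (by omega) grid1 hg1len hg1rows
      have hcol : (PySem.List.pyRange 0 m 1).foldl (oddColIncr j) (some grid1)
          = some (grid1.map (rowfn kj)) := by
        rw [hcol0, hkj]; norm_num
      have hstepB : oddStepB m n (some grid) [i, j] = some (grid1.map (rowfn kj)) := by
        simp only [oddStepB, Option.bind_eq_bind, Option.bind_some, hgetg, hrow, hsetg, hcol]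
      rw [List.foldl_cons, List.foldl_cons, hstepA, hstepB]
      -- invariants for the new state
      set a0 := lm.getD ki 0 with ha0
      set b0 := ln.getD kj 0 with hb0
      have ha0b : a0 = 0 ∨ a0 = 1 := by
        apply hbm; rw [ha0, List.getD_eq_getElem _ _ (by omega)]; exact List.getElem_mem (by omega)
      have hb0b : b0 = 0 ∨ b0 = 1 := by
        apply hbn; rw [hb0, List.getD_eq_getElem _ _ (by omega)]; exact List.getElem_mem (by omega)
      apply ih (fun q hq => hpre q (by simp [hq]))
      · rw [List.length_set]; exact hlm
      · rw [List.length_set]; exact hln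
      · rw [List.length_map]; exact hg1len
      · intro row hrowm
        obtain ⟨r0, hr0, hr0e⟩ := List.mem_map.mp hrowm
        rw [← hr0e, rowfn, List.length_set]; exact hg1rows _ hr0
      · intro v hv
        rcases List.mem_or_eq_of_mem_set hv with h | h
        · exact hbm _ h
        · rcases ha0b with h2 | h2 <;> rw [h, h2]
          · right; decide
          · left; decide
      · intro v hv
        rcases List.mem_or_eq_of_mem_set hv with h | h
        · exact hbn _ h
        · rcases hb0b with h2 | h2 <;> rw [h, h2]
          · right; decide
          · left; decide
      · intro x hx y hy
        have hxg1 : x < grid1.length := by omega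
        have hrx : (grid1.getD x []).length = n.toNat := by
          apply hg1rows
          rw [List.getD_eq_getElem _ _ hxg1]; exact List.getElem_mem hxg1
        rw [getD_map_lt grid1 (rowfn kj) x [] [] hxg1]
        rw [rowfn, getD_set_lt _ _ _ _ _ (by omega)]
        rw [hgrid1, getD_set_lt _ _ _ _ _ (by omega)]
        rw [getD_set_lt _ _ _ _ _ (by omega), getD_set_lt _ _ _ _ _ (by omega)]
        have hpxy := hpar x (by omega) y (by omega)
        have hpxj := hpar x (by omega) kj (by omega)
        have hpiy := hpar ki (by omega) y (by omega)
        have hpij := hpar ki (by omega) kj (by omega)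
        rw [← ha0, ← hb0] at hpij
        rw [← ha0] at hpiy
        rw [← hb0] at hpxj
        have hmapD : ∀ z, z < n.toNat →
            (((grid.getD ki []).map (· + 1)).getD z 0) = (grid.getD ki []).getD z 0 + 1 := by
          intro z hz
          exact getD_map_lt _ _ _ 0 _ (by omega)
        have e1 : PySem.Int.bxor 0 1 = 1 := by decide
        have e2 : PySem.Int.bxor 1 1 = 0 := by decide
        by_cases hxk : x = ki <;> by_cases hyk : y = kj
        · simp only [if_pos hxk, if_pos hyk]
          rw [hmapD kj (by omega)]
          rcases ha0b with h2 | h2 <;> rcases hb0b with h3 | h3 <;>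
            rw [h2, h3] at hpij ⊢ <;> simp only [e1, e2] <;> omega
        · simp only [if_pos hxk, if_neg hyk]
          rw [hmapD y (by omega)]
          rcases ha0b with h2 | h2 <;> rw [h2] at hpiy ⊢ <;> simp only [e1, e2] <;> omega
        · simp only [if_neg hxk, if_pos hyk]
          rcases hb0b with h3 | h3 <;> rw [h3] at hpxj ⊢ <;> simp only [e1, e2] <;> omega
        · simp only [if_neg hxk, if_neg hyk]
          exact hpxy

-- ===== VERDICT (by name: the statement is the Claim_ definition above) =====
theorem oddCells2_spec : Claim_equal_oddCells2 := by
  intro m n indices _ hpre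
  unfold Spec_oddCells2
  rcases indices with _ | ⟨p, tl⟩
  · unfold oddCells2 oddCells2_alt
    simp only [List.foldl_nil]
    have hm0 : PySem.Int.mod 0 2 = 0 := by decide
    simp [List.count_replicate, List.flatMap_def, List.map_replicate, hm0,
      List.sum_flatten, List.sum_replicate]
  · have hp := hpre p (by simp)
    have hmn : 0 < m ∧ 0 < n := by
      match p with
      | [] => simp [pvPairOK] at hp
      | [_] => simp [pvPairOK] at hp
      | (_ :: _ :: _ :: _) => simp [pvPairOK] at hp
      | [i, j] => simp only [pvPairOK, decide_eq_true_eq] at hp; omega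
    unfold oddCells2 oddCells2_alt
    exact mainLoop m n hmn.1 hmn.2 (p :: tl) hpre _ _ _
      (by simp) (by simp) (by simp) (by intro r hr; rw [List.eq_of_mem_replicate hr]; simp)
      (by intro v hv; left; exact List.eq_of_mem_replicate hv)
      (by intro v hv; left; exact List.eq_of_mem_replicate hv)
      (by
        intro x hx y hy
        have g1 : (List.replicate m.toNat (List.replicate n.toNat (0:Int))).getD x []
            = List.replicate n.toNat (0:Int) := by
          rw [List.getD_eq_getElem _ _ (by simpa using hx)]; simp
        have g2 : (List.replicate n.toNat (0:Int)).getD y 0 = 0 := by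
          rw [List.getD_eq_getElem _ _ (by simpa using hy)]; simp
        have g3 : (List.replicate m.toNat (0:Int)).getD x 0 = 0 := by
          rw [List.getD_eq_getElem _ _ (by simpa using hx)]; simp
        rw [g1, g2, g3]; norm_num)
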